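-- pv_equiv track=rewrite | github.com/gnlenfn/DailyProblemSolving | 프로그래머스/unrated/154538. 숫자 변환하기/숫자 변환하기.py | solution
-- ===== SOURCE A (Python) =====
-- from collections import deque
--
-- def solution(x, y, n):
--     """
--     BFS로 최단거리 찾기
--     """
--     queue = deque()
--     ret = [-1] * (y + 1)
--
--     queue.append(x)
--     ret[x] = 0
--
--     while queue:
--         cur = queue.popleft()
--         for nxt in [cur + n, cur * 2, cur * 3]:
--             if nxt > y:
--                 continue
--
--             if ret[nxt] > 0:
--                 continue
--
--             ret[nxt] = ret[cur] + 1
--             queue.append(nxt)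
--
--     return ret[y]
-- ===== SOURCE B (Python) =====
-- def solution(x, y, n):
--     """Bottom-up DP over v = x+1..y: dist(v) = 1 + min over reachable predecessors v-n, v//2, v//3."""
--     dp = [-1] * (y + 1)
--     dp[x] = 0
--     for v in range(x + 1, y + 1):
--         cands = [dp[v - n]] if v - n >= x else []
--         if v % 2 == 0:
--             cands.append(dp[v // 2])
--         if v % 3 == 0:
--             cands.append(dp[v // 3])
--         reach = [c for c in cands if c != -1]
--         if reach:
--             dp[v] = min(reach) + 1
--     return dp[y]
-- ===== Notes on version B (the rewrite author's own statement) =====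
-- stated objective: alternative
-- what changed: Replaces A's BFS (deque + visited array, forward edges cur+n/cur*2/cur*3) by a single bottom-up DP sweep v = x+1..y that pulls each cell from its predecessors v-n, v//2, v//3 (1 + minimum of the reachable ones, -1 if none), with no queue at all.
-- outside the precondition, e.g. on solution(0, 0, 17): A returns 1, B returns 0; on solution(51, 51, -4): A returns 13, B returns 0; on solution(8, 9, -3): A returns 3, B raises IndexError
import Mathlib
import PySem

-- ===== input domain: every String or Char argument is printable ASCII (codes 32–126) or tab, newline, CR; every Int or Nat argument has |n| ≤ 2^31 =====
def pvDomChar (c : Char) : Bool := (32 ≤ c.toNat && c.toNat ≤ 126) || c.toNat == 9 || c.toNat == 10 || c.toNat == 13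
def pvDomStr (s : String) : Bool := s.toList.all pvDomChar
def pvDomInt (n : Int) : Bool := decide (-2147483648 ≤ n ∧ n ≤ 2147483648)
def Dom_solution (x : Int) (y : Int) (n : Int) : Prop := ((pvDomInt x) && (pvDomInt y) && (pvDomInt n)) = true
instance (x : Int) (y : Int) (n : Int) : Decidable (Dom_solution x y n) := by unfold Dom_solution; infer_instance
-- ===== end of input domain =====

-- B replaces A's BFS queue by a bottom-up DP sweep over predecessors (v-n, v//2, v//3): a different
-- algorithm of the same cost ('alternative'), equal to A on the problem's stated domain 1 ≤ x ≤ y, 1 ≤ n.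

-- ===== PORT A =====
-- One step of the inner 'for nxt in [cur+n, cur*2, cur*3]' loop; state = (queue, ret).
-- Reads/writes ret[i] via pyGetD/pySetD (exact where Python's indexing succeeds; under Pre_ every index is in range).
def bfsStep (y : Int) (cur : Int) (st : List Int × List Int) (nxt : Int) : List Int × List Int :=
  if nxt > y then st
  else if PySem.List.pyGetD st.2 nxt 0 > 0 then st
  else (st.1 ++ [nxt], PySem.List.pySetD st.2 nxt (PySem.List.pyGetD st.2 cur 0 + 1))

-- The 'while queue' loop; fuel bounds the number of pops (each pop also enqueues at most 3 nodes,
-- each enqueue marks a fresh cell, so (y+1).toNat + 1 pops suffice under Pre_ — proved in bfsLoop_correct).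
def bfsLoop (y : Int) (n : Int) : Nat → List Int → List Int → List Int
  | 0, _, ret => ret
  | _ + 1, [], ret => ret
  | fuel + 1, cur :: queue, ret =>
      let st := [cur + n, cur * 2, cur * 3].foldl (bfsStep y cur) (queue, ret)
      bfsLoop y n fuel st.1 st.2

def solution (x : Int) (y : Int) (n : Int) : Int :=
  let ret := PySem.List.pySetD (List.replicate (y + 1).toNat (-1 : Int)) x 0
  let fin := bfsLoop y n ((y + 1).toNat + 1) [x] ret
  PySem.List.pyGetD fin y 0

-- ===== PORT B =====
-- One step of B's 'for v in range(x+1, y+1)' sweep: candidates dp[v-n] (if v-n >= x), dp[v//2] (if 2|v),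
-- dp[v//3] (if 3|v); keep the non-(-1) ones; dp[v] = min+1 if any.
def dpStep (x : Int) (n : Int) (dp : List Int) (v : Int) : List Int :=
  let cands :=
    (if x ≤ v - n then [PySem.List.pyGetD dp (v - n) (-1)] else [])
    ++ (if PySem.Int.mod v 2 = 0 then [PySem.List.pyGetD dp (PySem.Int.floordiv v 2) (-1)] else [])
    ++ (if PySem.Int.mod v 3 = 0 then [PySem.List.pyGetD dp (PySem.Int.floordiv v 3) (-1)] else [])
  let reach := cands.filter (fun c => c ≠ (-1 : Int))
  match PySem.List.min? reach (fun c => c) with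
  | none => dp
  | some m => PySem.List.pySetD dp v (m + 1)

def solution_alt (x : Int) (y : Int) (n : Int) : Int :=
  let dp0 := PySem.List.pySetD (List.replicate (y + 1).toNat (-1 : Int)) x 0
  let dp := (PySem.List.pyRange (x + 1) (y + 1)).foldl (dpStep x n) dp0
  PySem.List.pyGetD dp y 0

-- ===== PRECONDITION & SPEC =====
-- Pre_ is the problem's stated domain (1 ≤ x ≤ y, 1 ≤ n). Outside it A raises (x > y or y < 0: IndexError),
-- or returns accidental values of its wrapped negative indexing / re-enqueueing of x (n ≤ 0, x ≤ 0),
-- where B's DP either raises (dp[v-n] out of range for n ≤ 0) or returns the natural distance instead.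
def Pre_solution (x : Int) (y : Int) (n : Int) : Prop := 1 ≤ x ∧ x ≤ y ∧ 1 ≤ n
instance (x : Int) (y : Int) (n : Int) : Decidable (Pre_solution x y n) := by unfold Pre_solution; infer_instance
def pvWitness_solution : Int × Int × Int := (2, 12, 3)

def Spec_solution (x : Int) (y : Int) (n : Int) (out : Int) : Prop := out = solution_alt x y n
instance (x : Int) (y : Int) (n : Int) (out : Int) : Decidable (Spec_solution x y n out) := by unfold Spec_solution; infer_instance

-- ===== CLAIM (what is proved, stated in full; the proofs are below) =====
def Claim_equal_solution : Prop := ∀ (x : Int) (y : Int) (n : Int), Dom_solution x y n → Pre_solution x y n → Spec_solution x y n (solution x y n)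

-- ===== LEMMAS AND PROOFS =====

-- read ret[v]/dp[v] (any in-range read; default irrelevant there)
def rd (r : List Int) (v : Int) : Int := PySem.List.pyGetD r v 0
-- number of still-unassigned cells (BFS termination measure component)
def cntU (r : List Int) : Nat := r.countP (fun a => decide (a = -1))

-- the predecessors of v examined by B (in B's candidate order)
def preds (x : Int) (n : Int) (v : Int) : List Int :=
  (if x ≤ v - n then [v - n] else [])
  ++ (if PySem.Int.mod v 2 = 0 then [PySem.Int.floordiv v 2] else [])
  ++ (if PySem.Int.mod v 3 = 0 then [PySem.Int.floordiv v 3] else [])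

-- one DP cell from a lookup function f: -1 if no reachable predecessor, else 1 + min
def cellF (x : Int) (n : Int) (f : Int → Int) (v : Int) : Int :=
  match PySem.List.min? (((preds x n v).map f).filter (fun c => c ≠ (-1 : Int))) (fun c => c) with
  | none => -1
  | some m => m + 1

-- reference distance: distAux x n k is the value for node x + k
def distAux (x : Int) (n : Int) : Nat → Int
  | 0 => 0
  | k + 1 =>
      cellF x n (fun p => if _h : x ≤ p ∧ p - x < (k : Int) + 1 then distAux x n (p - x).toNat else -1) (x + k + 1)
  termination_by k => k
  decreasing_by omega

def distI (x : Int) (n : Int) (v : Int) : Int :=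
  if x ≤ v then distAux x n (v - x).toNat else -1

lemma distI_self (x n : Int) : distI x n x = 0 := by
  simp [distI, distAux]

lemma distI_neg (x n v : Int) (h : v < x) : distI x n v = -1 := by
  simp [distI]; omega

lemma mem_preds_iff (x n v p : Int) :
    p ∈ preds x n v ↔ (x ≤ v - n ∧ p = v - n) ∨
      (PySem.Int.mod v 2 = 0 ∧ p = PySem.Int.floordiv v 2) ∨
      (PySem.Int.mod v 3 = 0 ∧ p = PySem.Int.floordiv v 3) := by
  unfold preds; split_ifs <;> simp_all

lemma preds_lt (x n v p : Int) (hn : 1 ≤ n) (hv : 1 ≤ v) (hp : p ∈ preds x n v) : p < v := by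
  rw [mem_preds_iff] at hp
  rcases hp with ⟨h, rfl⟩ | ⟨h, rfl⟩ | ⟨h, rfl⟩
  · omega
  · rw [PySem.Int.floordiv_eq_ediv_of_pos (by norm_num)]; omega
  · rw [PySem.Int.floordiv_eq_ediv_of_pos (by norm_num)]; omega

lemma preds_nonneg (x n v p : Int) (hx : 1 ≤ x) (hv : 1 ≤ v) (hp : p ∈ preds x n v) : 0 ≤ p := by
  rw [mem_preds_iff] at hp
  rcases hp with ⟨h, rfl⟩ | ⟨h, rfl⟩ | ⟨h, rfl⟩
  · omega
  · rw [PySem.Int.floordiv_eq_ediv_of_pos (by norm_num)]; omega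
  · rw [PySem.Int.floordiv_eq_ediv_of_pos (by norm_num)]; omega

lemma preds_succ (x n v p : Int) (hp : p ∈ preds x n v) :
    v = p + n ∨ v = p * 2 ∨ v = p * 3 := by
  rw [mem_preds_iff] at hp
  rcases hp with ⟨h, rfl⟩ | ⟨h, rfl⟩ | ⟨h, rfl⟩
  · left; omega
  · right; left
    have := PySem.Int.floordiv_mul_add_mod v 2; omega
  · right; right
    have := PySem.Int.floordiv_mul_add_mod v 3; omega

lemma succ_mem_preds (x n c s : Int) (hc : x ≤ c)
    (hs : s = c + n ∨ s = c * 2 ∨ s = c * 3) : c ∈ preds x n s := by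
  rw [mem_preds_iff]
  rcases hs with rfl | rfl | rfl
  · left; constructor <;> omega
  · right; left
    refine ⟨(PySem.Int.mod_eq_zero_iff_dvd _ _).2 ⟨c, by ring⟩, ?_⟩
    rw [eq_comm, PySem.Int.floordiv_eq_iff_of_pos (by norm_num)]; omega
  · right; right
    refine ⟨(PySem.Int.mod_eq_zero_iff_dvd _ _).2 ⟨c, by ring⟩, ?_⟩
    rw [eq_comm, PySem.Int.floordiv_eq_iff_of_pos (by norm_num)]; omega

lemma cellF_congr (x n v : Int) (f g : Int → Int)
    (h : ∀ p ∈ preds x n v, f p = g p) : cellF x n f v = cellF x n g v := by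
  unfold cellF
  rw [List.map_congr_left h]

lemma cellF_cases (x n : Int) (f : Int → Int) (v : Int) :
    cellF x n f v = -1 ∨
      ∃ p ∈ preds x n v, f p ≠ -1 ∧ cellF x n f v = f p + 1 ∧
        (∀ q ∈ preds x n v, f q ≠ -1 → f p ≤ f q) := by
  unfold cellF
  rcases h : PySem.List.min? (((preds x n v).map f).filter (fun c => c ≠ (-1 : Int))) (fun c => c) with _ | m
  · left; rfl
  · right
    have hm := PySem.List.min?_mem h
    have hmin := PySem.List.min?_isMin h
    simp only [List.mem_filter, List.mem_map, decide_not] at hm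
    obtain ⟨⟨p, hp, rfl⟩, hne⟩ := hm
    refine ⟨p, hp, by simpa using hne, rfl, ?_⟩
    intro q hq hqne
    exact hmin (f q) (by simp [List.mem_filter, hqne]; exact ⟨q, hq, rfl⟩)

lemma cellF_le (x n : Int) (f : Int → Int) (v p : Int)
    (hp : p ∈ preds x n v) (hf : f p ≠ -1)
    (hall : ∀ q ∈ preds x n v, -1 ≤ f q) :
    cellF x n f v ≠ -1 ∧ cellF x n f v ≤ f p + 1 := by
  rcases cellF_cases x n f v with h | ⟨q, hq, hqne, heq, hmin⟩
  · exfalso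
    unfold cellF at h
    rcases hmm : PySem.List.min? (((preds x n v).map f).filter (fun c => c ≠ (-1 : Int))) (fun c => c) with _ | m
    · rw [PySem.List.min?_eq_none_iff] at hmm
      have : f p ∈ ((preds x n v).map f).filter (fun c => c ≠ (-1 : Int)) := by
        simp [List.mem_filter, hf]; exact ⟨p, hp, rfl⟩
      rw [hmm] at this; simp at this
    · rw [hmm] at h; simp at h
      have hm := PySem.List.min?_mem hmm
      simp only [List.mem_filter, List.mem_map, decide_not] at hm
      obtain ⟨⟨q, hq, rfl⟩, hne⟩ := hm
      have := hall q hq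
      simp at hne; omega
  · have h1 : -1 ≤ f q := hall q hq
    have h2 : f q ≤ f p := hmin p hp hf
    constructor
    · rw [heq]; omega
    · rw [heq]; omega

lemma distAux_shape (x n : Int) :
    ∀ k, distAux x n k = -1 ∨ (0 ≤ distAux x n k ∧ (k ≠ 0 → 1 ≤ distAux x n k)) := by
  intro k
  induction k using Nat.strong_induction_on with
  | _ k ih =>
    match k with
    | 0 => right; simp [distAux]
    | k + 1 =>
      rw [distAux]
      rcases cellF_cases x n
          (fun p => if _h : x ≤ p ∧ p - x < (k : Int) + 1 then distAux x n (p - x).toNat else -1)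
          (x + k + 1) with h | ⟨p, hp, hpne, heq, _⟩
      · left; exact h
      · right
        rw [heq]
        split_ifs at hpne with hcond
        · rw [dif_pos hcond]
          have hlt : (p - x).toNat < k + 1 := by omega
          rcases ih _ hlt with h' | ⟨h', _⟩
          · omega
          · constructor
            · omega
            · intro _; omega
        · simp at hpne

lemma distI_shape (x n v : Int) : distI x n v = -1 ∨ 0 ≤ distI x n v := by
  unfold distI
  split_ifs with h
  · rcases distAux_shape x n (v - x).toNat with h' | ⟨h', _⟩
    · left; exact h'
    · right; exact h'
  · left; rfl

lemma distI_ge (x n v : Int) : -1 ≤ distI x n v := by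
  rcases distI_shape x n v with h | h <;> omega

lemma distI_pos (x n v : Int) (hv : x < v) (hne : distI x n v ≠ -1) : 1 ≤ distI x n v := by
  unfold distI at hne ⊢
  rw [if_pos (by omega)] at hne ⊢
  rcases distAux_shape x n (v - x).toNat with h | ⟨_, h2⟩
  · exact absurd h hne
  · exact h2 (by omega)

lemma distI_ge_x (x n v : Int) (h : distI x n v ≠ -1) : x ≤ v := by
  by_contra hc
  exact h (distI_neg x n v (by omega))

lemma distI_fix (x n v : Int) (hx : 1 ≤ x) (hn : 1 ≤ n) (hv : x < v) :
    distI x n v = cellF x n (distI x n) v := by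
  have hk : (v - x).toNat = (v - x - 1).toNat + 1 := by omega
  conv_lhs => rw [distI, if_pos (by omega : x ≤ v), hk, distAux]
  have hxv : x + ((v - x - 1).toNat : Int) + 1 = v := by omega
  rw [hxv]
  apply cellF_congr
  intro p hp
  have hlt : p < v := preds_lt x n v p hn (by omega) hp
  by_cases hpx : x ≤ p
  · rw [dif_pos ⟨hpx, by omega⟩, distI, if_pos hpx]
  · rw [dif_neg (by omega), distI_neg x n p (by omega)]

lemma distI_succ_le (x n c s : Int) (hx : 1 ≤ x) (hn : 1 ≤ n) (hc : x ≤ c)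
    (hdc : 0 ≤ distI x n c) (hs : s = c + n ∨ s = c * 2 ∨ s = c * 3) :
    distI x n s ≠ -1 ∧ distI x n s ≤ distI x n c + 1 := by
  have hcs : c < s := by rcases hs with rfl | rfl | rfl <;> omega
  have hxs : x < s := by omega
  rw [distI_fix x n s hx hn hxs]
  exact cellF_le x n (distI x n) s c (succ_mem_preds x n c s hc hs) (by omega)
    (fun q _ => distI_ge x n q)

lemma distI_pred (x n v : Int) (hx : 1 ≤ x) (hn : 1 ≤ n) (hv : x < v)
    (hd : distI x n v ≠ -1) :
    ∃ p, x ≤ p ∧ p < v ∧ (v = p + n ∨ v = p * 2 ∨ v = p * 3) ∧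
      distI x n p = distI x n v - 1 ∧ 0 ≤ distI x n p := by
  have hfix := distI_fix x n v hx hn hv
  rcases cellF_cases x n (distI x n) v with h | ⟨p, hp, hpne, heq, _⟩
  · exact absurd (hfix.trans h) hd
  · refine ⟨p, distI_ge_x x n p hpne, preds_lt x n v p hn (by omega) hp,
      preds_succ x n v p hp, by omega, ?_⟩
    have := distI_ge x n p; omega

-- ===== BFS-side invariant =====

def BInv (x y n : Int) (q r : List Int) : Prop :=
  r.length = (y + 1).toNat ∧
  rd r x = 0 ∧
  (∀ v, x < v → v ≤ y → rd r v = -1 ∨ (rd r v = distI x n v ∧ 1 ≤ distI x n v)) ∧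
  (∀ c ∈ q, x ≤ c ∧ c ≤ y ∧ 0 ≤ rd r c) ∧
  q.Pairwise (fun a b => distI x n a ≤ distI x n b ∧ distI x n b ≤ distI x n a + 1) ∧
  (∀ c, x ≤ c → c ≤ y → 0 ≤ rd r c → c ∉ q →
     ∀ s, (s = c + n ∨ s = c * 2 ∨ s = c * 3) → s ≤ y → 0 ≤ rd r s)

lemma rd_set (r : List Int) (w a v : Int) (hw0 : 0 ≤ w) (hw : w < (r.length : Int)) (hv : 0 ≤ v) :
    rd (PySem.List.pySetD r w a) v = if v = w then a else rd r v := by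
  unfold rd
  rw [PySem.List.pySetD_of_nonneg r a hw0]
  by_cases hvw : v = w
  · subst hvw
    rw [if_pos rfl, PySem.List.pyGetD_eq_getElem _ 0 hv (by rw [List.length_set]; exact hw)]
    exact List.getElem_set_self _
  · rw [if_neg hvw]
    by_cases hlen : v < (r.length : Int)
    · rw [PySem.List.pyGetD_eq_getElem _ 0 hv (by rw [List.length_set]; exact hlen),
        PySem.List.pyGetD_eq_getElem _ 0 hv hlen]
      exact List.getElem_set_ne (by omega) _
    · have h2 : ((v.toNat : Int)) = v := by omega
      rw [← h2, PySem.List.pyGetD_natCast, PySem.List.pyGetD_natCast]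
      rw [List.getD_eq_getElem?_getD, List.getD_eq_getElem?_getD,
        List.getElem?_eq_none (by rw [List.length_set]; omega),
        List.getElem?_eq_none (by omega)]

lemma rd_init (x y v : Int) (hx : 0 ≤ x) (hxy : x ≤ y) (hv : 0 ≤ v) (hvy : v ≤ y) :
    rd (PySem.List.pySetD (List.replicate (y + 1).toNat (-1 : Int)) x 0) v
      = if v = x then 0 else -1 := by
  rw [rd_set _ _ _ _ hx (by rw [List.length_replicate]; omega) hv]
  by_cases hvx : v = x
  · rw [if_pos hvx, if_pos hvx]
  · rw [if_neg hvx, if_neg hvx]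
    unfold rd
    rw [PySem.List.pyGetD_eq_getElem _ 0 hv (by rw [List.length_replicate]; omega)]
    exact List.getElem_replicate _

lemma cntU_set (r : List Int) (w a : Int) (hw0 : 0 ≤ w) (hw : w < (r.length : Int))
    (hold : rd r w = -1) (ha : a ≠ -1) :
    cntU (PySem.List.pySetD r w a) + 1 = cntU r := by
  unfold cntU
  rw [PySem.List.pySetD_of_nonneg r a hw0]
  have hwl : w.toNat < r.length := by omega
  rw [List.countP_set hwl]
  have hget : r[w.toNat] = -1 := by
    have := rd_set r w (-37) w hw0 hw hw0
    unfold rd at hold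
    rw [PySem.List.pyGetD_eq_getElem _ 0 hw0 hw] at hold
    exact hold
  rw [if_pos (by simp [hget]), if_neg (by simp [ha])]
  have : 0 < r.countP (fun a => decide (a = -1)) := by
    rw [List.countP_pos_iff]
    exact ⟨r[w.toNat], List.getElem_mem _, by simp [hget]⟩
  omega

lemma BInv_rd_q (x y n : Int) (q r : List Int) (hx : 1 ≤ x) (inv : BInv x y n q r)
    (c : Int) (hc : c ∈ q) : rd r c = distI x n c ∧ 0 ≤ distI x n c := by
  obtain ⟨_, h2, h3, h4, _, _⟩ := inv
  obtain ⟨hcx, hcy, hcr⟩ := h4 c hc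
  by_cases hcx' : c = x
  · subst hcx'; rw [h2, distI_self]; exact ⟨rfl, le_refl 0⟩
  · rcases h3 c (by omega) hcy with h | ⟨h, h'⟩
    · omega
    · exact ⟨h, by omega⟩

lemma BInv_complete (x y n : Int) (q r : List Int) (hx : 1 ≤ x) (_hxy : x ≤ y) (hn : 1 ≤ n)
    (inv : BInv x y n q r) :
    ∀ (k : Nat) (v : Int), distI x n v ≤ (k : Int) → x ≤ v → v ≤ y → 0 ≤ distI x n v →
      (∀ u ∈ q, distI x n v < distI x n u) → 0 ≤ rd r v := by
  intro k
  induction k with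
  | zero =>
      intro v hk hv1 hv2 hd hq
      by_cases hvx : v = x
      · rw [hvx, inv.2.1]
      · exact absurd (distI_pos x n v (by omega) (by omega)) (by omega)
  | succ k ih =>
      intro v hk hv1 hv2 hd hq
      by_cases hvx : v = x
      · rw [hvx, inv.2.1]
      · have hpos : 1 ≤ distI x n v := distI_pos x n v (by omega) (by omega)
        obtain ⟨p, hp1, hp2, hp3, hp4, hp5⟩ := distI_pred x n v hx hn (by omega) (by omega)
        have hrdp : 0 ≤ rd r p := by
          refine ih p (by omega) hp1 (by omega) hp5 ?_
          intro u hu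
          have := hq u hu; omega
        have hpq : p ∉ q := by
          intro hmem
          have := hq p hmem; omega
        exact inv.2.2.2.2.2 p hp1 (by omega) hrdp hpq v hp3 hv2

-- mid-state of the inner successor loop of one BFS iteration
def Mid (x y n cur : Int) (r0 rest : List Int) (st : List Int × List Int) : Prop :=
  st.2.length = r0.length ∧
  ∃ news, st.1 = rest ++ news ∧
    (∀ v : Int, 0 ≤ v → v ∉ news → rd st.2 v = rd r0 v) ∧
    (∀ u ∈ news, x < u ∧ u ≤ y ∧ rd r0 u = -1 ∧ rd st.2 u = distI x n cur + 1 ∧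
       distI x n u = distI x n cur + 1 ∧ (u = cur + n ∨ u = cur * 2 ∨ u = cur * 3)) ∧
    st.1.length + cntU st.2 = rest.length + cntU r0

lemma bfsStep_mid (x y n cur s : Int) (r0 rest : List Int) (st : List Int × List Int)
    (hx : 1 ≤ x) (hxy : x ≤ y) (hn : 1 ≤ n)
    (inv : BInv x y n (cur :: rest) r0)
    (hcx : x ≤ cur) (hcy : cur ≤ y)
    (hs : s = cur + n ∨ s = cur * 2 ∨ s = cur * 3)
    (mid : Mid x y n cur r0 rest st) :
    Mid x y n cur r0 rest (bfsStep y cur st s) ∧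
      (∀ v, 0 ≤ v → 0 ≤ rd st.2 v → 0 ≤ rd (bfsStep y cur st s).2 v) ∧
      (s ≤ y → 0 ≤ rd (bfsStep y cur st s).2 s) := by
  obtain ⟨hlen, news, hq, hunch, hnews, hmeas⟩ := mid
  obtain ⟨hrc, hdc⟩ := BInv_rd_q x y n (cur :: rest) r0 hx inv cur (List.mem_cons_self)
  have hr0len : r0.length = (y + 1).toNat := inv.1
  have hs0 : 0 ≤ s ∧ cur < s := by rcases hs with rfl | rfl | rfl <;> omega
  have hcurnews : cur ∉ news := by
    intro hmem
    rcases (hnews cur hmem).2.2.2.2.2 with h | h | h <;> omega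
  have hrscur : rd st.2 cur = rd r0 cur := hunch cur (by omega) hcurnews
  unfold bfsStep
  split_ifs with h1 h2
  · exact ⟨⟨hlen, news, hq, hunch, hnews, hmeas⟩, fun v _ h => h, fun hsy => absurd hsy (by omega)⟩
  · change rd st.2 s > 0 at h2
    exact ⟨⟨hlen, news, hq, hunch, hnews, hmeas⟩, fun v _ h => h, fun _ => by omega⟩
  · change ¬ rd st.2 s > 0 at h2
    have hsnews : s ∉ news := by
      intro hmem
      have := (hnews s hmem).2.2.2.1
      omega
    have hrs0 : rd st.2 s = rd r0 s := hunch s (by omega) hsnews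
    have hxls : x < s := by omega
    have hr0s : rd r0 s = -1 := by
      rcases inv.2.2.1 s hxls (by omega) with h | ⟨ha, hb⟩
      · exact h
      · omega
    obtain ⟨hne, hle⟩ := distI_succ_le x n cur s hx hn hcx hdc hs
    have hge1 : 1 ≤ distI x n s := distI_pos x n s hxls hne
    have hDs : distI x n s = distI x n cur + 1 := by
      by_contra hc
      obtain ⟨p, hp1, hp2, hp3, hp4, hp5⟩ := distI_pred x n s hx hn hxls hne
      have hall : ∀ u ∈ cur :: rest, distI x n p < distI x n u := by
        intro u hu
        rcases List.mem_cons.1 hu with rfl | hu'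
        · omega
        · have pairw := inv.2.2.2.2.1
          rw [List.pairwise_cons] at pairw
          have := (pairw.1 u hu').1
          omega
      have hrdp : 0 ≤ rd r0 p :=
        BInv_complete x y n (cur :: rest) r0 hx hxy hn inv (distI x n p).toNat p (by omega)
          hp1 (by omega) hp5 hall
      have hpnotq : p ∉ cur :: rest := by
        intro hmem
        have := hall p hmem; omega
      have := inv.2.2.2.2.2 p hp1 (by omega) hrdp hpnotq s hp3 (by omega)
      omega
    have hval : PySem.List.pyGetD st.2 cur 0 + 1 = distI x n cur + 1 := by
      change rd st.2 cur + 1 = _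
      rw [hrscur, hrc]
    have hslen : s < ((st.2.length : Int)) := by rw [hlen, hr0len]; omega
    refine ⟨⟨by rw [PySem.List.length_pySetD]; exact hlen, news ++ [s], ?_, ?_, ?_, ?_⟩, ?_, ?_⟩
    · show st.1 ++ [s] = rest ++ (news ++ [s])
      rw [hq, List.append_assoc]
    · intro v hv0 hvnot
      simp only [List.mem_append, List.mem_singleton, not_or] at hvnot
      show rd (PySem.List.pySetD st.2 s _) v = rd r0 v
      rw [rd_set st.2 s _ v (by omega) hslen hv0, if_neg hvnot.2]
      exact hunch v hv0 hvnot.1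
    · intro u hu
      rcases List.mem_append.1 hu with hu' | hu'
      · obtain ⟨a1, a2, a3, a4, a5, a6⟩ := hnews u hu'
        refine ⟨a1, a2, a3, ?_, a5, a6⟩
        show rd (PySem.List.pySetD st.2 s _) u = _
        rw [rd_set st.2 s _ u (by omega) hslen (by omega),
          if_neg (by intro h; rw [h] at hu'; exact hsnews hu')]
        exact a4
      · rw [List.mem_singleton] at hu'
        subst hu'
        refine ⟨hxls, by omega, hr0s, ?_, hDs, hs⟩
        show rd (PySem.List.pySetD st.2 u _) u = _
        rw [rd_set st.2 u _ u (by omega) hslen (by omega), if_pos rfl]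
        exact hval
    · show (st.1 ++ [s]).length + cntU (PySem.List.pySetD st.2 s _) = _
      have hcnt : cntU (PySem.List.pySetD st.2 s (PySem.List.pyGetD st.2 cur 0 + 1)) + 1
          = cntU st.2 := by
        apply cntU_set st.2 s _ (by omega) hslen (by omega) (by omega)
      rw [List.length_append]
      simp only [List.length_singleton]
      omega
    · intro v hv0 hvpos
      show 0 ≤ rd (PySem.List.pySetD st.2 s _) v
      rw [rd_set st.2 s _ v (by omega) hslen hv0]
      split_ifs
      · omega
      · exact hvpos
    · intro _
      show 0 ≤ rd (PySem.List.pySetD st.2 s _) s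
      rw [rd_set st.2 s _ s (by omega) hslen (by omega), if_pos rfl]
      omega

lemma bfs_iter (x y n cur : Int) (rest r : List Int)
    (hx : 1 ≤ x) (hxy : x ≤ y) (hn : 1 ≤ n)
    (inv : BInv x y n (cur :: rest) r) :
    BInv x y n ([cur + n, cur * 2, cur * 3].foldl (bfsStep y cur) (rest, r)).1
              ([cur + n, cur * 2, cur * 3].foldl (bfsStep y cur) (rest, r)).2 ∧
    ([cur + n, cur * 2, cur * 3].foldl (bfsStep y cur) (rest, r)).1.length
      + cntU ([cur + n, cur * 2, cur * 3].foldl (bfsStep y cur) (rest, r)).2 + 1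
      = (cur :: rest).length + cntU r := by
  obtain ⟨hcx, hcy, hcr⟩ := inv.2.2.2.1 cur (List.mem_cons_self)
  have hdc : 0 ≤ distI x n cur := (BInv_rd_q x y n (cur :: rest) r hx inv cur List.mem_cons_self).2
  have hrlen : r.length = (y + 1).toNat := inv.1
  have mid0 : Mid x y n cur r rest (rest, r) :=
    ⟨rfl, [], by simp, fun v _ _ => rfl, by simp, by simp⟩
  obtain ⟨mid1, mono1, proc1⟩ := bfsStep_mid x y n cur (cur + n) r rest (rest, r)
    hx hxy hn inv hcx hcy (Or.inl rfl) mid0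
  obtain ⟨mid2, mono2, proc2⟩ := bfsStep_mid x y n cur (cur * 2) r rest _
    hx hxy hn inv hcx hcy (Or.inr (Or.inl rfl)) mid1
  obtain ⟨mid3, mono3, proc3⟩ := bfsStep_mid x y n cur (cur * 3) r rest _
    hx hxy hn inv hcx hcy (Or.inr (Or.inr rfl)) mid2
  have e : [cur + n, cur * 2, cur * 3].foldl (bfsStep y cur) (rest, r)
      = bfsStep y cur (bfsStep y cur (bfsStep y cur (rest, r) (cur + n)) (cur * 2)) (cur * 3) := by
    simp only [List.foldl_cons, List.foldl_nil]
  rw [e]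
  obtain ⟨hlen3, news, hq3, hunch3, hnews3, hmeas3⟩ := mid3
  have hproc : ∀ s, (s = cur + n ∨ s = cur * 2 ∨ s = cur * 3) → s ≤ y →
      0 ≤ rd (bfsStep y cur (bfsStep y cur (bfsStep y cur (rest, r) (cur + n)) (cur * 2)) (cur * 3)).2 s := by
    intro s hsucc hsy
    rcases hsucc with rfl | rfl | rfl
    · exact mono3 _ (by omega) (mono2 _ (by omega) (proc1 hsy))
    · exact mono3 _ (by omega) (proc2 hsy)
    · exact proc3 hsy
  have hunch' : ∀ v : Int, 0 ≤ v → v ∉ news →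
      rd (bfsStep y cur (bfsStep y cur (bfsStep y cur (rest, r) (cur + n)) (cur * 2)) (cur * 3)).2 v = rd r v :=
    hunch3
  have hxnews : x ∉ news := by
    intro hmem
    have := (hnews3 x hmem).1
    omega
  constructor
  · refine ⟨hlen3.trans hrlen, ?_, ?_, ?_, ?_, ?_⟩
    · rw [hunch' x (by omega) hxnews]
      exact inv.2.1
    · intro v hv1 hv2
      by_cases hvn : v ∈ news
      · obtain ⟨a1, a2, a3, a4, a5, a6⟩ := hnews3 v hvn
        right
        rw [a4, a5]
        omega
      · rw [hunch' v (by omega) hvn]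
        exact inv.2.2.1 v hv1 hv2
    · intro c hc
      rw [hq3] at hc
      rcases List.mem_append.1 hc with hc' | hc'
      · obtain ⟨b1, b2, b3⟩ := inv.2.2.2.1 c (List.mem_cons_of_mem _ hc')
        refine ⟨b1, b2, ?_⟩
        by_cases hcn : c ∈ news
        · obtain ⟨a1, a2, a3, a4, a5, a6⟩ := hnews3 c hcn
          rw [a4]; omega
        · rw [hunch' c (by omega) hcn]; exact b3
      · obtain ⟨a1, a2, a3, a4, a5, a6⟩ := hnews3 c hc'
        exact ⟨by omega, a2, by rw [a4]; omega⟩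
    · rw [hq3, List.pairwise_append]
      have pairw := inv.2.2.2.2.1
      rw [List.pairwise_cons] at pairw
      refine ⟨pairw.2, ?_, ?_⟩
      · apply List.pairwise_of_forall_mem_list
        intro a ha b hb
        rw [(hnews3 a ha).2.2.2.2.1, (hnews3 b hb).2.2.2.2.1]
        omega
      · intro a ha b hb
        have h1 := pairw.1 a ha
        have h2 := (hnews3 b hb).2.2.2.2.1
        omega
    · intro c hc1 hc2 hc3 hc4 s hsucc hsy
      by_cases hccur : c = cur
      · subst hccur
        exact hproc s hsucc hsy
      · rw [hq3] at hc4
        simp only [List.mem_append, not_or] at hc4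
        rw [hunch' c (by omega) hc4.2] at hc3
        have hcq : c ∉ cur :: rest := by
          intro hmem
          rcases List.mem_cons.1 hmem with h | h
          · exact hccur h
          · exact hc4.1 h
        have hs0 := inv.2.2.2.2.2 c hc1 hc2 hc3 hcq s hsucc hsy
        by_cases hsn : s ∈ news
        · obtain ⟨a1, a2, a3, a4, a5, a6⟩ := hnews3 s hsn
          rw [a4]; omega
        · rw [hunch' s (by omega) hsn]
          exact hs0
  · rw [hq3] at hmeas3 ⊢
    rw [List.length_append] at hmeas3 ⊢
    simp only [List.length_cons]
    omega

lemma BInv_final (x y n : Int) (r : List Int) (hx : 1 ≤ x) (hxy : x ≤ y) (hn : 1 ≤ n)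
    (inv : BInv x y n [] r) :
    ∀ v, x ≤ v → v ≤ y → rd r v = distI x n v := by
  intro v hv1 hv2
  by_cases hvx : v = x
  · subst hvx; rw [distI_self]; exact inv.2.1
  · rcases distI_shape x n v with hD | hD
    · rcases inv.2.2.1 v (by omega) hv2 with h | ⟨h, h'⟩
      · rw [h, hD]
      · omega
    · have hrd : 0 ≤ rd r v :=
        BInv_complete x y n [] r hx hxy hn inv (distI x n v).toNat v (by omega) hv1 hv2 hD
          (by intro u hu; simp at hu)
      rcases inv.2.2.1 v (by omega) hv2 with h | ⟨h, _⟩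
      · omega
      · exact h

lemma bfsLoop_correct (x y n : Int) (hx : 1 ≤ x) (hxy : x ≤ y) (hn : 1 ≤ n) :
    ∀ (fuel : Nat) (q r : List Int), BInv x y n q r → q.length + cntU r ≤ fuel →
      ∀ v, x ≤ v → v ≤ y → rd (bfsLoop y n fuel q r) v = distI x n v := by
  intro fuel
  induction fuel with
  | zero =>
      intro q r inv hμ v hv1 hv2
      have hq : q = [] := by
        cases q with
        | nil => rfl
        | cons a l => simp at hμ
      subst hq
      exact BInv_final x y n r hx hxy hn inv v hv1 hv2
  | succ fuel ih =>
      intro q r inv hμ v hv1 hv2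
      cases q with
      | nil =>
          exact BInv_final x y n r hx hxy hn inv v hv1 hv2
      | cons cur rest =>
          rw [bfsLoop]
          obtain ⟨inv', hμ'⟩ := bfs_iter x y n cur rest r hx hxy hn inv
          exact ih _ _ inv' (by simp at hμ hμ' ⊢; omega) v hv1 hv2

lemma BInv_init (x y n : Int) (hx : 1 ≤ x) (hxy : x ≤ y) (_hn : 1 ≤ n) :
    BInv x y n [x] (PySem.List.pySetD (List.replicate (y + 1).toNat (-1 : Int)) x 0) := by
  refine ⟨by simp [PySem.List.length_pySetD], ?_, ?_, ?_, ?_, ?_⟩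
  · rw [rd_init x y x (by omega) hxy (by omega) (by omega)]; simp
  · intro v hv1 hv2
    rw [rd_init x y v (by omega) hxy (by omega) hv2, if_neg (by omega)]
    left; rfl
  · intro c hc; simp at hc
    refine ⟨by omega, by omega, ?_⟩
    rw [hc, rd_init x y x (by omega) hxy (by omega) (by omega)]; simp
  · simp
  · intro c hc1 hc2 hc3 hc4 s hsucc hsy
    simp at hc4
    rw [rd_init x y c (by omega) hxy (by omega) hc2, if_neg hc4] at hc3
    omega

lemma solution_eq (x y n : Int) (hx : 1 ≤ x) (hxy : x ≤ y) (hn : 1 ≤ n) :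
    solution x y n = distI x n y := by
  show rd (bfsLoop y n ((y + 1).toNat + 1) [x]
      (PySem.List.pySetD (List.replicate (y + 1).toNat (-1 : Int)) x 0)) y = distI x n y
  apply bfsLoop_correct x y n hx hxy hn _ _ _ (BInv_init x y n hx hxy hn) _ y hxy (le_refl y)
  have h1 : cntU (PySem.List.pySetD (List.replicate (y + 1).toNat (-1 : Int)) x 0)
      ≤ (y + 1).toNat := by
    have := List.countP_le_length (l := PySem.List.pySetD (List.replicate (y + 1).toNat (-1 : Int)) x 0)
      (p := fun a => decide (a = -1))
    simpa [cntU, PySem.List.length_pySetD] using this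
  simp; omega

-- ===== DP-side =====

lemma dpStep_eq (x n : Int) (dp : List Int) (v : Int) (g : Int → Int)
    (hread : ∀ p ∈ preds x n v, PySem.List.pyGetD dp p (-1) = g p)
    (hge : ∀ p ∈ preds x n v, -1 ≤ g p) :
    dpStep x n dp v =
      if cellF x n g v = -1 then dp else PySem.List.pySetD dp v (cellF x n g v) := by
  have hc : (if x ≤ v - n then [PySem.List.pyGetD dp (v - n) (-1)] else [])
      ++ (if PySem.Int.mod v 2 = 0 then [PySem.List.pyGetD dp (PySem.Int.floordiv v 2) (-1)] else [])
      ++ (if PySem.Int.mod v 3 = 0 then [PySem.List.pyGetD dp (PySem.Int.floordiv v 3) (-1)] else [])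
      = (preds x n v).map (fun p => PySem.List.pyGetD dp p (-1)) := by
    unfold preds; split_ifs <;> simp
  rw [List.map_congr_left hread] at hc
  unfold dpStep cellF
  rw [hc]
  simp only [ne_eq, decide_not]
  rcases h : PySem.List.min? (((preds x n v).map g).filter (fun c => !decide (c = (-1 : Int)))) (fun c => c) with _ | m
  · simp
  · have hm := PySem.List.min?_mem h
    simp only [List.mem_filter, List.mem_map] at hm
    obtain ⟨⟨p, hp, rfl⟩, hne⟩ := hm
    have h1 := hge p hp
    -- `simp only [h]` also iota-reduces the matches on the rewritten scrutinee (the linter wrongly flags h)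
    simp only [h]
    rw [if_neg (by simp at hne; omega)]

lemma dpFold (x y n : Int) (hx : 1 ≤ x) (hxy : x ≤ y) (hn : 1 ≤ n) :
    ∀ (k : Nat) (w : Int) (dp : List Int), (y - w).toNat = k → x ≤ w → w ≤ y →
      dp.length = (y + 1).toNat →
      (∀ v, 0 ≤ v → v ≤ y → rd dp v = if v ≤ w then distI x n v else -1) →
      ∀ v, 0 ≤ v → v ≤ y →
        rd ((PySem.List.pyRange (w + 1) (y + 1)).foldl (dpStep x n) dp) v = distI x n v := by
  intro k
  induction k with
  | zero =>
      intro w dp hk hw1 hw2 hlen hinv v hv1 hv2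
      have hwy : w = y := by omega
      subst hwy
      rw [PySem.List.pyRange_one_eq_nil (le_refl _), List.foldl_nil]
      rw [hinv v hv1 hv2, if_pos hv2]
  | succ k ih =>
      intro w dp hk hw1 hw2 hlen hinv v hv1 hv2
      have hwy : w < y := by omega
      rw [PySem.List.pyRange_one_cons (by omega : w + 1 < y + 1), List.foldl_cons]
      have hlenI : ((dp.length : Int)) = y + 1 := by rw [hlen]; omega
      have hread : ∀ p ∈ preds x n (w + 1), PySem.List.pyGetD dp p (-1) = distI x n p := by
        intro p hp
        have hp0 : 0 ≤ p := preds_nonneg x n (w + 1) p hx (by omega) hp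
        have hplt : p < w + 1 := preds_lt x n (w + 1) p hn (by omega) hp
        rw [PySem.List.pyGetD_eq_getElem _ _ hp0 (by omega)]
        have := hinv p hp0 (by omega)
        unfold rd at this
        rw [PySem.List.pyGetD_eq_getElem _ _ hp0 (by omega)] at this
        rw [this, if_pos (by omega)]
      rw [dpStep_eq x n dp (w + 1) (distI x n) hread (fun p _ => distI_ge x n p),
        ← distI_fix x n (w + 1) hx hn (by omega)]
      by_cases hD : distI x n (w + 1) = -1
      · rw [if_pos hD]
        refine ih (w + 1) dp (by omega) (by omega) (by omega) hlen ?_ v hv1 hv2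
        intro u hu1 hu2
        rw [hinv u hu1 hu2]
        by_cases huw : u = w + 1
        · rw [huw, if_neg (by omega), if_pos (le_refl _), hD]
        · by_cases huw' : u ≤ w
          · rw [if_pos huw', if_pos (by omega)]
          · rw [if_neg huw', if_neg (by omega)]
      · rw [if_neg hD]
        refine ih (w + 1) _ (by omega) (by omega) (by omega)
          (by rw [PySem.List.length_pySetD]; exact hlen) ?_ v hv1 hv2
        intro u hu1 hu2
        rw [rd_set dp (w + 1) _ u (by omega) (by omega) hu1]
        by_cases huw : u = w + 1
        · rw [if_pos huw, if_pos (by omega), huw]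
        · rw [if_neg huw, hinv u hu1 hu2]
          by_cases huw' : u ≤ w
          · rw [if_pos huw', if_pos (by omega)]
          · rw [if_neg huw', if_neg (by omega)]

lemma solution_alt_eq (x y n : Int) (hx : 1 ≤ x) (hxy : x ≤ y) (hn : 1 ≤ n) :
    solution_alt x y n = distI x n y := by
  show rd ((PySem.List.pyRange (x + 1) (y + 1)).foldl (dpStep x n)
      (PySem.List.pySetD (List.replicate (y + 1).toNat (-1 : Int)) x 0)) y = distI x n y
  apply dpFold x y n hx hxy hn (y - x).toNat x _ rfl (le_refl x) hxy
    (by simp [PySem.List.length_pySetD]) _ y (by omega) (le_refl y)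
  intro v hv1 hv2
  rw [rd_init x y v (by omega) hxy hv1 hv2]
  by_cases hvx : v = x
  · subst hvx; simp [distI_self]
  · rw [if_neg hvx]
    by_cases hvw : v ≤ x
    · rw [if_pos hvw, distI_neg x n v (by omega)]
    · rw [if_neg hvw]

-- ===== VERDICT (by name: the statement is the Claim_ definition above) =====
theorem solution_spec : Claim_equal_solution := by
  intro x y n _ hpre
  obtain ⟨hx, hxy, hn⟩ := hpre
  show solution x y n = solution_alt x y n
  rw [solution_eq x y n hx hxy hn, solution_alt_eq x y n hx hxy hn]
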